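-- pv_equiv track=rewrite | github.com/wolvesfield/CIPHER-MCP | ai_command_center.py | extract_option
-- ===== SOURCE A (Python) =====
-- def extract_option(parts: list[str], option: str) -> tuple[list[str], str | None]:
--     lower = [p.lower() for p in parts]
--     if option not in lower:
--         return parts, None
--     idx = lower.index(option)
--     if idx + 1 >= len(parts):
--         return parts[:idx], None
--     value = parts[idx + 1]
--     remaining = parts[:idx] + parts[idx + 2 :]
--     return remaining, value
-- ===== SOURCE B (Python) =====
-- def extract_option(parts: list[str], option: str) -> tuple[list[str], str | None]:
--     # Single pass: walk the list once, keeping the already-seen prefix;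
--     # stop at the first element whose lowercase equals option and splice there.
--     prefix: list[str] = []
--     it = iter(parts)
--     for p in it:
--         if p.lower() == option:
--             rest = list(it)
--             if not rest:
--                 return prefix, None
--             return prefix + rest[1:], rest[0]
--         prefix.append(p)
--     return parts, None
-- ===== Notes on version B (the rewrite author's own statement) =====
-- stated objective: alternative
-- what changed: B replaces A's three scans (build a full lowercased copy, membership test, .index, then slice arithmetic) with one pass that consumes the list while keeping the seen prefix, splicing directly at the first match.
import Mathlib
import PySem

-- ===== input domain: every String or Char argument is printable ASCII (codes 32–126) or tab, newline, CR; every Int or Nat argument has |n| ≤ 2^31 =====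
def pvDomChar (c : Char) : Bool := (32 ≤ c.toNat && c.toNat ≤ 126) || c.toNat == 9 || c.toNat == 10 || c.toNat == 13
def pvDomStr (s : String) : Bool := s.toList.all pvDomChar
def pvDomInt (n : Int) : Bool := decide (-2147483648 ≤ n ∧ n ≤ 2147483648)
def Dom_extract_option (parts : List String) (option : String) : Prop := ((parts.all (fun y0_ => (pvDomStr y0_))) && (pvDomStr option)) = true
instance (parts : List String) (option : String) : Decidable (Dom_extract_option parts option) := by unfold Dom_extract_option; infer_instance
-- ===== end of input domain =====

-- B: one pass consuming the list with a seen-prefix accumulator instead of A's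
-- lowercased copy + membership + .index + slice arithmetic; same cost, different decomposition.


-- ===== PORT A =====
def extract_option (parts : List String) (option : String) : List String × Option String :=
  let lower := parts.map PySem.Str.lower
  if option ∈ lower then
    -- .index cannot raise here: membership was just checked, so getD's default is never used
    let idx := (PySem.List.index? lower option).getD 0
    if (idx : Int) + 1 ≥ parts.length then
      (PySem.List.slice parts none (some (idx : Int)), none)
    else
      let value := ((PySem.List.pyGet? parts ((idx : Int) + 1)).getD "")
      let remaining := PySem.List.slice parts none (some (idx : Int)) ++
                       PySem.List.slice parts (some ((idx : Int) + 2)) none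
      (remaining, some value)
  else (parts, none)

-- ===== PORT B =====
-- the while loop of Source B: `pre` is the accumulated prefix, the match argument is `rest`
def extractGo (parts : List String) (option : String) :
    List String → List String → List String × Option String
  | _, [] => (parts, none)
  | pre, p :: rest =>
    if PySem.Str.lower p = option then
      match rest with
      | [] => (pre, none)
      | v :: rest' => (pre ++ rest', some v)
    else extractGo parts option (pre ++ [p]) rest

def extract_option_alt (parts : List String) (option : String) : List String × Option String :=
  extractGo parts option [] parts

-- ===== PRECONDITION & SPEC =====
def Spec_extract_option (parts : List String) (option : String) (out : List String × Option String) : Prop := out = extract_option_alt parts option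
instance (parts : List String) (option : String) (out : List String × Option String) : Decidable (Spec_extract_option parts option out) := by unfold Spec_extract_option; infer_instance

-- ===== CLAIM (what is proved, stated in full; the proofs are below) =====
def Claim_equal_extract_option : Prop := ∀ (parts : List String) (option : String), Dom_extract_option parts option → Spec_extract_option parts option (extract_option parts option)

-- ===== LEMMAS AND PROOFS =====

lemma extractGo_eq (option : String) :
    ∀ (suffix pre parts : List String),
      parts = pre ++ suffix →
      (∀ q ∈ pre, PySem.Str.lower q ≠ option) →
      extractGo parts option pre suffix = extract_option parts option := by
  intro suffix
  induction suffix with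
  | nil =>
    intro pre parts hparts hpre
    subst hparts
    have hmem : option ∉ (pre ++ ([] : List String)).map PySem.Str.lower := by
      simp only [List.append_nil, List.mem_map]
      rintro ⟨q, hq, hql⟩
      exact hpre q hq hql
    simp only [extractGo, extract_option]
    rw [if_neg hmem]
  | cons p rest ih =>
    intro pre parts hparts hpre
    subst hparts
    by_cases hp : PySem.Str.lower p = option
    · have hnp : option ∉ pre.map PySem.Str.lower := by
        simp only [List.mem_map]
        rintro ⟨q, hq, hql⟩
        exact hpre q hq hql
      have hmem : option ∈ (pre ++ p :: rest).map PySem.Str.lower := by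
        simp [hp]
      have hidx : PySem.List.index? ((pre ++ p :: rest).map PySem.Str.lower) option
          = some pre.length := by
        rw [PySem.List.index?_eq_some_iff]
        exact ⟨pre.map PySem.Str.lower, rest.map PySem.Str.lower,
          by simp [hp], by simp, hnp⟩
      cases rest with
      | nil =>
        have hge : ((pre.length : Int) + 1 ≥ ((pre ++ [p]).length : Int)) := by
          simp
        simp only [extractGo, hp, extract_option, hmem, hidx, Option.getD_some, hge]
        simp [PySem.List.slice_to_natCast]
      | cons v rest' =>
        have hlt : ¬ ((pre.length : Int) + 1 ≥ ((pre ++ p :: v :: rest').length : Int)) := by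
          simp
        simp only [extractGo, hp, extract_option, hmem, hidx, Option.getD_some, if_neg hlt]
        have h1 : ((pre.length : Int) + 1) = ((pre.length + 1 : Nat) : Int) := by push_cast; ring
        have h2 : ((pre.length : Int) + 2) = ((pre.length + 2 : Nat) : Int) := by push_cast; ring
        rw [h1, h2, PySem.List.pyGet?_natCast, PySem.List.slice_to_natCast,
          PySem.List.slice_from_natCast]
        have hdrop : (pre ++ p :: v :: rest').drop (pre.length + 2) = rest' := by
          simp
        simp [hdrop]
    · have : extractGo (pre ++ p :: rest) option pre (p :: rest)
          = extractGo (pre ++ p :: rest) option (pre ++ [p]) rest := by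
        simp [extractGo, hp]
      rw [this, ih (pre ++ [p]) (pre ++ p :: rest) (by simp)]
      intro q hq
      rcases List.mem_append.mp hq with h | h
      · exact hpre q h
      · simp at h; subst h; exact hp

-- ===== VERDICT (by name: the statement is the Claim_ definition above) =====
theorem extract_option_spec : Claim_equal_extract_option := by
  intro parts option _
  show extract_option parts option = extract_option_alt parts option
  rw [extract_option_alt, extractGo_eq option parts [] parts (by simp) (by simp)]
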